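-- pv_equiv track=rewrite | github.com/CandeGodoy/prog | programacion/NumerosDeFischer2.py | esnumerodefischer
-- ===== SOURCE A (Python) =====
-- def esnumerodefischer(n):
--     # Construimos una lista por comprensión con los divisores del número, incluyendo al propio número
--     divisores = [d for d in range(1, n+1) if n%d==0]
--     # Ahora que tenemos la lista de divisores, calculamos su producto
--     producto = 1
--     for i in divisores:
--         producto = producto * i
--     # Verificamos si el producto de los divisores coincide con el cubo del número
--     if producto == n**3:
--         return True
--     else:
--         return False
-- ===== SOURCE B (Python) =====
-- def esnumerodefischer(n):
--     # Numbers <= 0 have no positive divisors in range(1, n+1); product 1 never equals n**3 there.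
--     if n <= 0:
--         return False
--     producto = 1
--     d = 1
--     while d * d <= n:
--         if n % d == 0:
--             if d * d == n:
--                 producto *= d
--             else:
--                 producto *= d * (n // d)
--         d += 1
--     return producto == n ** 3
-- ===== Notes on version B (the rewrite author's own statement) =====
-- stated objective: faster
-- what changed: B enumerates divisors only up to the square root of n, multiplying each divisor d together with its cofactor n//d (just d when d*d == n), instead of A's full trial-division scan of every d in 1..n.
import Mathlib
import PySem

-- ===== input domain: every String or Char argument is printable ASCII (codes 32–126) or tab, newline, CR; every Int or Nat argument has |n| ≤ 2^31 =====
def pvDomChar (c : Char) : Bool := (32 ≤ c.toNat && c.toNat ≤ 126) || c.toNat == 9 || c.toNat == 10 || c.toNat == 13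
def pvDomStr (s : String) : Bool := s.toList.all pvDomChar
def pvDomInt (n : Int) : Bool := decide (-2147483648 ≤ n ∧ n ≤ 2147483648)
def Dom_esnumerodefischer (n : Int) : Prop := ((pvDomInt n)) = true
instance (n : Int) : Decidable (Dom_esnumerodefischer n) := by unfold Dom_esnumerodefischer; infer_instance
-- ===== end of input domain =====

-- B enumerates divisors only up to √n, in complementary pairs (d, n//d), instead of A's full scan of 1..n.

-- ===== PORT A =====
def esnumerodefischer (n : Int) : Bool :=
  let divisores := (PySem.List.pyRange 1 (n+1) 1).filter (fun d => PySem.Int.mod n d == 0)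
  let producto := divisores.foldl (fun p i => p * i) 1
  if producto == n ^ 3 then true else false

-- ===== PORT B =====
-- while d*d <= n: multiply in d and its cofactor n//d (only d itself when d*d == n)
def fischerLoop (n d producto : Int) : Int :=
  if d * d ≤ n then
    fischerLoop n (d + 1)
      (if PySem.Int.mod n d == 0 then
        (if d * d == n then producto * d else producto * (d * PySem.Int.floordiv n d))
       else producto)
  else producto
termination_by (n + 1 - d).toNat
decreasing_by
  have h2 : d ≤ n := by nlinarith [sq_nonneg (d-1), mul_self_nonneg d]
  omega

def esnumerodefischer_alt (n : Int) : Bool :=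
  if n ≤ 0 then false
  else fischerLoop n 1 1 == n ^ 3

-- ===== PRECONDITION & SPEC =====
def Spec_esnumerodefischer (n : Int) (out : Bool) : Prop := out = esnumerodefischer_alt n
instance (n : Int) (out : Bool) : Decidable (Spec_esnumerodefischer n out) := by unfold Spec_esnumerodefischer; infer_instance

-- ===== CLAIM (what is proved, stated in full; the proofs are below) =====
def Claim_equal_esnumerodefischer : Prop := ∀ (n : Int), Dom_esnumerodefischer n → Spec_esnumerodefischer n (esnumerodefischer n)

-- ===== LEMMAS AND PROOFS =====

-- A's filtered-range fold is the product over 1..N of divisor-or-1 factors.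
theorem aProd_gen (n : Int) (N : ℕ) :
    ((PySem.List.pyRange 1 ((N:Int)+1) 1).filter
        (fun d => PySem.Int.mod n d == 0)).foldl (fun p i => p * i) 1
      = ∏ d ∈ Finset.Ico 1 (N+1), (if (d:Int) ∣ n then (d:Int) else 1) := by
  have hb : ∀ d : Int, (PySem.Int.mod n d == 0) = decide (d ∣ n) := by
    intro d; rw [Bool.eq_iff_iff]; simp [PySem.Int.mod_eq_zero_iff_dvd]
  induction N with
  | zero =>
    rw [PySem.List.pyRange_one_eq_nil (by norm_num)]
    simp
  | succ N ih =>
    have hcast : ((N+1 : ℕ) : Int) + 1 = ((N:Int) + 1) + 1 := by push_cast; ring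
    rw [Finset.prod_Ico_succ_top (Nat.le_add_left 1 N), hcast,
      PySem.List.pyRange_one_succ_right (by linarith [Nat.cast_nonneg (α := ℤ) N]),
      List.filter_append, List.foldl_append, ih]
    by_cases h : ((N:Int)+1) ∣ n
    · have h' : ((N+1 : ℕ) : Int) ∣ n := by push_cast; exact h
      rw [if_pos h']
      simp only [List.filter_cons, List.filter_nil, hb, h, decide_true, if_true,
        List.foldl_cons, List.foldl_nil]
      push_cast; ring
    · have h' : ¬ ((N+1 : ℕ) : Int) ∣ n := by push_cast; exact h
      rw [if_neg h']
      simp only [List.filter_cons, List.filter_nil, hb, h, decide_false]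
      simp

-- B's loop computes the product of paired small-divisor contributions from k up to √m.
theorem loop_spec (m : ℕ) (k : ℕ) (hk : 1 ≤ k) (p : Int) :
    fischerLoop (m:Int) (k:Int) p
      = p * ∏ e ∈ Finset.Ico k (Nat.sqrt m + 1),
          (if e ∣ m then (if e*e = m then (e:Int) else (e:Int) * ((m/e : ℕ) : Int)) else 1) := by
  suffices H : ∀ fuel k, 1 ≤ k → Nat.sqrt m + 1 - k ≤ fuel → ∀ p : Int,
      fischerLoop (m:Int) (k:Int) p
        = p * ∏ e ∈ Finset.Ico k (Nat.sqrt m + 1),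
            (if e ∣ m then (if e*e = m then (e:Int) else (e:Int) * ((m/e : ℕ) : Int)) else 1) by
    exact H (Nat.sqrt m + 1 - k) k hk le_rfl p
  intro fuel
  induction fuel with
  | zero =>
    intro k hk hf p
    have hcond : ¬ ((k:Int) * (k:Int) ≤ (m:Int)) := by
      rw [show ((k:Int) * (k:Int)) = ((k*k : ℕ) : Int) by push_cast; ring]
      intro hle
      have : k * k ≤ m := by exact_mod_cast hle
      exact absurd (Nat.le_sqrt.mpr this) (by omega)
    rw [fischerLoop, if_neg hcond, Finset.Ico_eq_empty (by omega), Finset.prod_empty, mul_one]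
  | succ fuel ih =>
    intro k hk hf p
    by_cases hle : k ≤ Nat.sqrt m
    · have hcond : (k:Int) * (k:Int) ≤ (m:Int) := by
        have : k * k ≤ m := Nat.le_sqrt.mp hle
        exact_mod_cast this
      have hlt : k < Nat.sqrt m + 1 := by omega
      have hfuel : Nat.sqrt m + 1 - (k+1) ≤ fuel := by omega
      rw [fischerLoop, if_pos hcond,
        show ((k:Int) + 1) = ((k+1 : ℕ) : Int) by push_cast; ring,
        ih (k+1) (by omega) hfuel]
      conv_rhs => rw [Finset.prod_eq_prod_Ico_succ_bot hlt]
      by_cases h1 : k ∣ m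
      · have hbeq1 : (PySem.Int.mod (m:Int) (k:Int) == 0) = true := by
          simp only [beq_iff_eq, PySem.Int.mod_eq_zero_iff_dvd]
          exact_mod_cast h1
        by_cases h2 : k*k = m
        · have hbeq2 : (((k:Int) * (k:Int)) == (m:Int)) = true := by
            have : ((k:Int) * (k:Int)) = (m:Int) := by exact_mod_cast h2
            simp [this]
          simp only [hbeq1, hbeq2, if_true, h1, h2]
          ring
        · have hbeq2 : (((k:Int) * (k:Int)) == (m:Int)) = false := by
            simp only [beq_eq_false_iff_ne, Ne]
            intro hh; exact h2 (by exact_mod_cast hh)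
          have hfd : PySem.Int.floordiv (m:Int) (k:Int) = ((m/k : ℕ) : Int) :=
            PySem.Int.floordiv_natCast m k
          simp only [hbeq1, hbeq2, if_true, Bool.false_eq_true, if_false, h1, h2, hfd]
          ring
      · have hbeq1 : (PySem.Int.mod (m:Int) (k:Int) == 0) = false := by
          simp only [beq_eq_false_iff_ne, Ne, PySem.Int.mod_eq_zero_iff_dvd]
          intro hh; exact h1 (by exact_mod_cast hh)
        simp only [hbeq1, Bool.false_eq_true, if_false, h1]
        ring
    · have hcond : ¬ ((k:Int) * (k:Int) ≤ (m:Int)) := by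
        rw [show ((k:Int) * (k:Int)) = ((k*k : ℕ) : Int) by push_cast; ring]
        intro hle'
        have : k * k ≤ m := by exact_mod_cast hle'
        exact absurd (Nat.le_sqrt.mpr this) (by omega)
      rw [fischerLoop, if_neg hcond, Finset.Ico_eq_empty (by omega), Finset.prod_empty, mul_one]

-- The pairing d ↦ m/d: product of all divisors = product of paired contributions up to √m.
theorem pair_prod_nat (m : ℕ) (hm : 1 ≤ m) :
    (∏ d ∈ m.divisors, d)
      = ∏ e ∈ m.divisors.filter (fun e => e*e ≤ m), (if e*e = m then e else e * (m/e)) := by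
  classical
  have hm0 : m ≠ 0 := by omega
  set S := m.divisors.filter (fun e => e*e < m) with hS
  set E := m.divisors.filter (fun e => e*e = m) with hE
  set L := m.divisors.filter (fun e => ¬ e*e ≤ m) with hL
  have memS : ∀ e ∈ S, e ∣ m ∧ e*e < m := by
    intro e he; rw [hS, Finset.mem_filter, Nat.mem_divisors] at he
    exact ⟨he.1.1, by simpa using he.2⟩
  have memL : ∀ e ∈ L, e ∣ m ∧ m < e*e := by
    intro e he; rw [hL, Finset.mem_filter, Nat.mem_divisors] at he
    exact ⟨he.1.1, by omega⟩
  have hpair : (∏ e ∈ S, m / e) = ∏ e ∈ L, e := by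
    apply Finset.prod_nbij' (i := fun e => m / e) (j := fun e => m / e)
    · intro e he
      obtain ⟨hd, hlt⟩ := memS e he
      have he1 : 0 < e := Nat.pos_of_dvd_of_pos hd (by omega)
      have hme : e * (m / e) = m := Nat.mul_div_cancel' hd
      have helt : e < m / e := by nlinarith
      rw [hL, Finset.mem_filter, Nat.mem_divisors]
      refine ⟨⟨Nat.div_dvd_of_dvd hd, hm0⟩, ?_⟩
      rw [not_le]
      nlinarith
    · intro e he
      obtain ⟨hd, hgt⟩ := memL e he
      have he1 : 0 < e := Nat.pos_of_dvd_of_pos hd (by omega)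
      have hme : e * (m / e) = m := Nat.mul_div_cancel' hd
      have hq1 : 0 < m / e := Nat.div_pos (Nat.le_of_dvd (by omega) hd) he1
      have helt : m / e < e := by nlinarith
      rw [hS, Finset.mem_filter, Nat.mem_divisors]
      exact ⟨⟨Nat.div_dvd_of_dvd hd, hm0⟩, by nlinarith⟩
    · intro e he
      exact Nat.div_div_self (memS e he).1 hm0
    · intro e he
      exact Nat.div_div_self (memL e he).1 hm0
    · intro e he; rfl
  have hsplit : (∏ d ∈ m.divisors, d)
      = (∏ e ∈ m.divisors.filter (fun e => e*e ≤ m), e) * ∏ e ∈ L, e := by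
    rw [hL, Finset.prod_filter_mul_prod_filter_not]
  have hsplit2 : (m.divisors.filter (fun e => e*e ≤ m)) = S ∪ E := by
    rw [hS, hE, ← Finset.filter_or]
    apply Finset.filter_congr
    intro e _; omega
  have hdisj : Disjoint S E := by
    rw [Finset.disjoint_left]
    intro a ha hb
    rw [hS, Finset.mem_filter] at ha
    rw [hE, Finset.mem_filter] at hb
    omega
  have hSprod : (∏ e ∈ S, (if e*e = m then e else e * (m/e)))
      = (∏ e ∈ S, e) * (∏ e ∈ S, m/e) := by
    rw [← Finset.prod_mul_distrib]
    apply Finset.prod_congr rfl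
    intro e he
    rw [if_neg (by have := (memS e he).2; omega)]
  have hEprod : (∏ e ∈ E, (if e*e = m then e else e * (m/e))) = ∏ e ∈ E, e := by
    apply Finset.prod_congr rfl
    intro e he
    rw [hE, Finset.mem_filter] at he
    rw [if_pos he.2]
  rw [hsplit, hsplit2, Finset.prod_union hdisj, Finset.prod_union hdisj, hSprod, hEprod, ← hpair]
  ring

-- A's Ico product is the (cast) product of all divisors.
theorem aProd_divisors (m : ℕ) (hm : 1 ≤ m) :
    (∏ d ∈ Finset.Ico 1 (m+1), (if (d:Int) ∣ (m:Int) then (d:Int) else 1))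
      = ((∏ d ∈ m.divisors, d : ℕ) : Int) := by
  classical
  rw [← Finset.prod_filter]
  have hset : ((Finset.Ico 1 (m+1) : Finset ℕ)).filter (fun d : ℕ => (d:Int) ∣ (m:Int)) = m.divisors := by
    ext a
    simp only [Finset.mem_filter, Finset.mem_Ico, Nat.mem_divisors, Int.natCast_dvd_natCast]
    constructor
    · rintro ⟨⟨_, _⟩, h3⟩; exact ⟨h3, by omega⟩
    · rintro ⟨h1, _⟩
      exact ⟨⟨Nat.pos_of_dvd_of_pos h1 (by omega),
        by have := Nat.le_of_dvd (by omega) h1; omega⟩, h1⟩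
  rw [hset, Nat.cast_prod]

-- B's Ico-to-√m product is the (cast) product of paired small-divisor contributions.
theorem bProd_divisors (m : ℕ) (hm : 1 ≤ m) :
    (∏ e ∈ Finset.Ico 1 (Nat.sqrt m + 1),
        (if e ∣ m then (if e*e = m then (e:Int) else (e:Int) * ((m/e : ℕ) : Int)) else 1))
      = ((∏ e ∈ m.divisors.filter (fun e => e*e ≤ m), (if e*e = m then e else e * (m/e)) : ℕ) : Int) := by
  classical
  rw [← Finset.prod_filter]
  have hset : (Finset.Ico 1 (Nat.sqrt m + 1)).filter (fun e => e ∣ m)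
      = m.divisors.filter (fun e => e*e ≤ m) := by
    ext a
    simp only [Finset.mem_filter, Finset.mem_Ico, Nat.mem_divisors]
    constructor
    · rintro ⟨⟨_, h2⟩, h3⟩
      exact ⟨⟨h3, by omega⟩, Nat.le_sqrt.mp (by omega)⟩
    · rintro ⟨⟨h1, _⟩, h2⟩
      exact ⟨⟨Nat.pos_of_dvd_of_pos h1 (by omega),
        by have := Nat.le_sqrt.mpr h2; omega⟩, h1⟩
  rw [hset, Nat.cast_prod]
  apply Finset.prod_congr rfl
  intro e _
  split_ifs <;> push_cast <;> ring

-- ===== VERDICT (by name: the statement is the Claim_ definition above) =====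
theorem esnumerodefischer_spec : Claim_equal_esnumerodefischer := by
  unfold Claim_equal_esnumerodefischer
  intro n _
  unfold Spec_esnumerodefischer esnumerodefischer esnumerodefischer_alt
  by_cases hn : n ≤ 0
  · rw [if_pos hn, PySem.List.pyRange_one_eq_nil (by omega)]
    simp only [List.filter_nil, List.foldl_nil]
    have h3 : n^3 ≤ 0 := Odd.pow_nonpos ⟨1, by ring⟩ hn
    have hne : ((1:Int) == n^3) = false := by
      simp only [beq_eq_false_iff_ne, Ne]
      omega
    simp [hne]
  · rw [if_neg hn]
    obtain ⟨m, rfl⟩ : ∃ m : ℕ, n = (m:Int) := ⟨n.toNat, (Int.toNat_of_nonneg (by omega)).symm⟩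
    have hm1 : 1 ≤ m := by
      by_contra h
      exact hn (by interval_cases m; norm_num)
    have hB := loop_spec m 1 le_rfl 1
    rw [Nat.cast_one] at hB
    show (if ((((PySem.List.pyRange 1 ((m:Int)+1) 1).filter
          (fun d => PySem.Int.mod (m:Int) d == 0)).foldl (fun p i => p * i) 1) == (m:Int)^3) = true
        then true else false) = (fischerLoop (m:Int) 1 1 == (m:Int)^3)
    rw [aProd_gen (m:Int) m, hB, one_mul, aProd_divisors m hm1, bProd_divisors m hm1,
      pair_prod_nat m hm1]
    split <;> simp_all
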